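-- pv_equiv track=rewrite | github.com/Fast-64/fast64 | fast64_internal/sm64/sm64_geolayout_writer.py | convertVertDictToArray
-- ===== SOURCE A (Python) =====
-- def convertVertDictToArray(vertDict):
--     data = []
--     matRegions = {}
--     for material_index, vertData in vertDict:
--         start = len(data)
--         data.extend(vertData)
--         end = len(data)
--         matRegions[material_index] = (start, end)
--     return data, matRegions
-- ===== SOURCE B (Python) =====
-- def convertVertDictToArray(vertDict):
--     items = list(vertDict)
--     lengths = [len(v) for _, v in items]
--     ends = []
--     total = 0
--     for n in lengths:
--         total += n
--         ends.append(total)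
--     starts = [0] + ends[:-1]
--     data = [x for _, v in items for x in v]
--     matRegions = {mi: (s, e) for (mi, _), s, e in zip(items, starts, ends)}
--     return data, matRegions
-- ===== Notes on version B (the rewrite author's own statement) =====
-- stated objective: alternative
-- what changed: Replaces A's fused loop (which grows data and records offsets incrementally in one pass) by an offset-table decomposition: compute the region lengths, prefix-sum them into end offsets, derive starts by shifting, flatten the data with one comprehension, and zip items with starts/ends into the region dict.
import Mathlib
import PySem

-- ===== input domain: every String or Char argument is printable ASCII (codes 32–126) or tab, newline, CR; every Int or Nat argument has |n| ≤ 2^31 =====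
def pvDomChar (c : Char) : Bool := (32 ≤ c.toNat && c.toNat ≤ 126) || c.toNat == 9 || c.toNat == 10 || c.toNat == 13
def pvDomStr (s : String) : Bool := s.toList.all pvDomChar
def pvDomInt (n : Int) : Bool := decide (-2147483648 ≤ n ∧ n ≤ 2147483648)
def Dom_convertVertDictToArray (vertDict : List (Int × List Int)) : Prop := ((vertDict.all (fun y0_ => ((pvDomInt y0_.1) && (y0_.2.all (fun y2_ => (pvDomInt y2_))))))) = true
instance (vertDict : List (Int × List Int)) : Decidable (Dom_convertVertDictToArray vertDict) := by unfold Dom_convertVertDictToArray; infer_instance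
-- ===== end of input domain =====

-- B replaces A's fused incremental-offset loop by an offset-table decomposition
-- (lengths → prefix-sum ends → shifted starts → flatten → zip into the dict); alternative, same cost.

-- ===== PORT A =====
-- the loop body: start = len(data); data.extend(vertData); end = len(data); matRegions[mi] = (start, end)
def convertVertDictToArray (vertDict : List (Int × List Int)) : List Int × (List (Int × Int × Int)) :=
  let r := vertDict.foldl
    (fun (st : List Int × PySem.Dict Int (Int × Int)) p =>
      let start : Int := st.1.length
      let data := st.1 ++ p.2
      let e : Int := data.length
      (data, st.2.insert p.1 (start, e)))
    ([], PySem.Dict.empty)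
  (r.1, r.2.items.map (fun q => (q.1, q.2.1, q.2.2)))

-- ===== PORT B =====
-- the Python loop 'total = 0; for n in lengths: total += n; ends.append(total)' as structural recursion over the same state
def pvEndsLoop (total : Int) : List Int → List Int
  | [] => []
  | n :: rest => (total + n) :: pvEndsLoop (total + n) rest

def convertVertDictToArray_alt (vertDict : List (Int × List Int)) : List Int × (List (Int × Int × Int)) :=
  let items := vertDict
  let lengths := items.map (fun p => (p.2.length : Int))
  let ends := pvEndsLoop 0 lengths
  let starts := 0 :: ends.dropLast        -- [0] + ends[:-1]
  let data := items.flatMap (fun p => p.2)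
  let matRegions := (items.zip (starts.zip ends)).foldl
    (fun (d : PySem.Dict Int (Int × Int)) q => d.insert q.1.1 (q.2.1, q.2.2))
    PySem.Dict.empty
  (data, matRegions.items.map (fun q => (q.1, q.2.1, q.2.2)))

-- ===== PRECONDITION & SPEC =====
def Spec_convertVertDictToArray (vertDict : List (Int × List Int)) (out : List Int × (List (Int × Int × Int))) : Prop := out = convertVertDictToArray_alt vertDict
instance (vertDict : List (Int × List Int)) (out : List Int × (List (Int × Int × Int))) : Decidable (Spec_convertVertDictToArray vertDict out) := by unfold Spec_convertVertDictToArray; infer_instance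

-- ===== CLAIM (what is proved, stated in full; the proofs are below) =====
def Claim_equal_convertVertDictToArray : Prop := ∀ (vertDict : List (Int × List Int)), Dom_convertVertDictToArray vertDict → Spec_convertVertDictToArray vertDict (convertVertDictToArray vertDict)

-- ===== LEMMAS AND PROOFS =====

-- the common region list: (material, start, end) with running offset t
def pvRegions (t : Int) : List (Int × List Int) → List (Int × (Int × Int))
  | [] => []
  | p :: rest => (p.1, (t, t + p.2.length)) :: pvRegions (t + p.2.length) rest

-- A's fold, generalized over accumulated data and dict
theorem pvFoldA (vd : List (Int × List Int)) (data : List Int) (d : PySem.Dict Int (Int × Int)) :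
    vd.foldl
      (fun (st : List Int × PySem.Dict Int (Int × Int)) p =>
        let start : Int := st.1.length
        let data := st.1 ++ p.2
        let e : Int := data.length
        (data, st.2.insert p.1 (start, e)))
      (data, d)
    = (data ++ vd.flatMap (fun p => p.2),
       (pvRegions (data.length) vd).foldl (fun d q => d.insert q.1 q.2) d) := by
  induction vd generalizing data d with
  | nil => simp [pvRegions]
  | cons p rest ih =>
    simp only [List.foldl_cons, pvRegions]
    rw [ih]
    simp only [List.flatMap_cons, List.length_append]
    push_cast
    simp [List.append_assoc]

-- B's zipped fold equals the same regions fold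
theorem pvFoldB (vd : List (Int × List Int)) (t : Int) (d : PySem.Dict Int (Int × Int)) :
    (vd.zip ((t :: (pvEndsLoop t (vd.map (fun p => (p.2.length : Int)))).dropLast).zip
             (pvEndsLoop t (vd.map (fun p => (p.2.length : Int)))))).foldl
      (fun (d : PySem.Dict Int (Int × Int)) q => d.insert q.1.1 (q.2.1, q.2.2)) d
    = (pvRegions t vd).foldl (fun d q => d.insert q.1 q.2) d := by
  induction vd generalizing t d with
  | nil => simp [pvRegions, pvEndsLoop]
  | cons p rest ih =>
    cases rest with
    | nil => simp [pvRegions, pvEndsLoop]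
    | cons q r =>
      simp only [List.map_cons, pvEndsLoop, pvRegions, List.zip_cons_cons, List.foldl_cons]
      exact ih (t + p.2.length) _

theorem convertVertDictToArray_eq (vd : List (Int × List Int)) :
    convertVertDictToArray vd = convertVertDictToArray_alt vd := by
  unfold convertVertDictToArray convertVertDictToArray_alt
  simp only []
  rw [pvFoldA, pvFoldB]
  simp

-- ===== VERDICT (by name: the statement is the Claim_ definition above) =====
theorem convertVertDictToArray_spec : Claim_equal_convertVertDictToArray := by
  intro vd _
  exact convertVertDictToArray_eq vd
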